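-- pv_equiv track=rewrite | github.com/robert-herzig/local_agent_team | main.py | is_image_request
-- ===== SOURCE A (Python) =====
-- def is_image_request(question):
--     """Check if the user is requesting image generation."""
--     image_keywords = [
--         'generate image', 'create image', 'make image', 'draw', 'picture', 'photo',
--         'generate picture', 'create picture', 'make picture', 'show me', 'visualize',
--         'image of', 'picture of', 'drawing of', 'illustration of', 'artwork of',
--         'generate art', 'create art', 'make art', 'paint', 'sketch', 'render'
--     ]
--
--     question_lower = question.lower()
--     return any(keyword in question_lower for keyword in image_keywords)
-- ===== SOURCE B (Python) =====
-- # First-letter index: keywords grouped by their initial character, built once;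
-- # a single pass over the text consults only the bucket for the character at
-- # each position instead of running a full substring search per keyword.
-- _KW_INDEX = {
--     'g': ['generate image', 'generate picture', 'generate art'],
--     'c': ['create image', 'create picture', 'create art'],
--     'm': ['make image', 'make picture', 'make art'],
--     'd': ['draw', 'drawing of'],
--     'p': ['picture', 'photo', 'picture of', 'paint'],
--     's': ['show me', 'sketch'],
--     'v': ['visualize'],
--     'i': ['image of', 'illustration of'],
--     'a': ['artwork of'],
--     'r': ['render'],
-- }
--
-- def is_image_request(question):
--     """Check if the user is requesting image generation."""
--     q = question.lower()
--     for i, ch in enumerate(q):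
--         for k in _KW_INDEX.get(ch, []):
--             if q.startswith(k, i):
--                 return True
--     return False
-- ===== Notes on version B (the rewrite author's own statement) =====
-- stated objective: alternative
-- what changed: B replaces A's 22 independent substring searches with a first-letter index (keywords grouped by their initial character, built once) and a single pass over the text that at each position checks only the bucket of keywords starting with that character.
import Mathlib
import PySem

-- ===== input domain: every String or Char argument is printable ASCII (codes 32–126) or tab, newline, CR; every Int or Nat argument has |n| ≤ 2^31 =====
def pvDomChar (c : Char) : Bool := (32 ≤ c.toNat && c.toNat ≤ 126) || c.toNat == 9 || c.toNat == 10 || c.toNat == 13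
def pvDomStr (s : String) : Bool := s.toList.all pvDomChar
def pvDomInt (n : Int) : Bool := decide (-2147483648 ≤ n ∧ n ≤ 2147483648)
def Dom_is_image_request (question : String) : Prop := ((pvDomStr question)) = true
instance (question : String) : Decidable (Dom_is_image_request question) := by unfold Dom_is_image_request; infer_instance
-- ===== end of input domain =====

-- B groups the keywords by first character in an index built once and makes a single
-- pass over the text, consulting only the bucket of the character at each position
-- (objective: alternative; return value only, no side effects in either version).

-- ===== PORT A =====
def pvImageKeywords : List String := [
  "generate image", "create image", "make image", "draw", "picture", "photo",
  "generate picture", "create picture", "make picture", "show me", "visualize",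
  "image of", "picture of", "drawing of", "illustration of", "artwork of",
  "generate art", "create art", "make art", "paint", "sketch", "render"]

def is_image_request (question : String) : Bool :=
  let question_lower := PySem.Str.lower question
  pvImageKeywords.any (fun keyword => PySem.Str.isIn keyword question_lower)

-- ===== PORT B =====
-- the module-level first-letter index `_KW_INDEX`; `.get(ch, [])` ported as this
-- total function (the dict keys are distinct literals, so lookup = this match)
def pvKwIndex (ch : Char) : List (List Char) :=
  if ch = 'g' then
    [['g','e','n','e','r','a','t','e',' ','i','m','a','g','e'],
     ['g','e','n','e','r','a','t','e',' ','p','i','c','t','u','r','e'],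
     ['g','e','n','e','r','a','t','e',' ','a','r','t']]
  else if ch = 'c' then
    [['c','r','e','a','t','e',' ','i','m','a','g','e'],
     ['c','r','e','a','t','e',' ','p','i','c','t','u','r','e'],
     ['c','r','e','a','t','e',' ','a','r','t']]
  else if ch = 'm' then
    [['m','a','k','e',' ','i','m','a','g','e'],
     ['m','a','k','e',' ','p','i','c','t','u','r','e'],
     ['m','a','k','e',' ','a','r','t']]
  else if ch = 'd' then
    [['d','r','a','w'], ['d','r','a','w','i','n','g',' ','o','f']]
  else if ch = 'p' then
    [['p','i','c','t','u','r','e'], ['p','h','o','t','o'],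
     ['p','i','c','t','u','r','e',' ','o','f'], ['p','a','i','n','t']]
  else if ch = 's' then
    [['s','h','o','w',' ','m','e'], ['s','k','e','t','c','h']]
  else if ch = 'v' then
    [['v','i','s','u','a','l','i','z','e']]
  else if ch = 'i' then
    [['i','m','a','g','e',' ','o','f'],
     ['i','l','l','u','s','t','r','a','t','i','o','n',' ','o','f']]
  else if ch = 'a' then
    [['a','r','t','w','o','r','k',' ','o','f']]
  else if ch = 'r' then
    [['r','e','n','d','e','r']]
  else []

-- the `for i, ch in enumerate(q)` loop, as structural recursion on the suffixes of q
def pvIndexScan : List Char → Bool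
  | [] => false
  | c :: t => (pvKwIndex c).any (fun k => PySem.Chars.startswith (c :: t) k) || pvIndexScan t

def is_image_request_alt (question : String) : Bool :=
  pvIndexScan (PySem.Str.lower question).toList

-- ===== PRECONDITION & SPEC =====
def Spec_is_image_request (question : String) (out : Bool) : Prop := out = is_image_request_alt question
instance (question : String) (out : Bool) : Decidable (Spec_is_image_request question out) := by unfold Spec_is_image_request; infer_instance

-- ===== CLAIM (what is proved, stated in full; the proofs are below) =====
def Claim_equal_is_image_request : Prop := ∀ (question : String), Dom_is_image_request question → Spec_is_image_request question (is_image_request question)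

-- ===== LEMMAS AND PROOFS =====

-- every keyword, as a list of characters
def pvKwChars : List (List Char) := pvImageKeywords.map String.toList

theorem pvKwChars_eq : pvKwChars =
    [['g','e','n','e','r','a','t','e',' ','i','m','a','g','e'],
     ['c','r','e','a','t','e',' ','i','m','a','g','e'],
     ['m','a','k','e',' ','i','m','a','g','e'],
     ['d','r','a','w'], ['p','i','c','t','u','r','e'], ['p','h','o','t','o'],
     ['g','e','n','e','r','a','t','e',' ','p','i','c','t','u','r','e'],
     ['c','r','e','a','t','e',' ','p','i','c','t','u','r','e'],
     ['m','a','k','e',' ','p','i','c','t','u','r','e'],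
     ['s','h','o','w',' ','m','e'], ['v','i','s','u','a','l','i','z','e'],
     ['i','m','a','g','e',' ','o','f'], ['p','i','c','t','u','r','e',' ','o','f'],
     ['d','r','a','w','i','n','g',' ','o','f'],
     ['i','l','l','u','s','t','r','a','t','i','o','n',' ','o','f'],
     ['a','r','t','w','o','r','k',' ','o','f'],
     ['g','e','n','e','r','a','t','e',' ','a','r','t'],
     ['c','r','e','a','t','e',' ','a','r','t'],
     ['m','a','k','e',' ','a','r','t'],
     ['p','a','i','n','t'], ['s','k','e','t','c','h'],
     ['r','e','n','d','e','r']] := by decide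

-- every bucket of the index holds only keywords
theorem pvIndex_sub (c : Char) (k : List Char) (h : k ∈ pvKwIndex c) :
    k ∈ pvKwChars := by
  rw [pvKwChars_eq]
  unfold pvKwIndex at h
  split_ifs at h <;> (fin_cases h <;> decide)

-- a keyword starting with the character c lies in the bucket for c
theorem pvIndex_complete (c : Char) (t : List Char) (k : List Char)
    (hk : k ∈ pvKwChars) (hp : k <+: c :: t) : k ∈ pvKwIndex c := by
  rw [pvKwChars_eq] at hk
  fin_cases hk <;>
    (rw [List.cons_prefix_cons] at hp; obtain ⟨rfl, -⟩ := hp; decide)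

-- at a position whose character is c, the bucket for c finds a keyword prefix
-- exactly when the full keyword list does (all other keywords start elsewhere)
theorem pvBucket_iff (c : Char) (t : List Char) :
    (∃ k ∈ pvKwIndex c, k <+: c :: t) ↔ ∃ k ∈ pvKwChars, k <+: c :: t := by
  constructor
  · rintro ⟨k, hk, hp⟩; exact ⟨k, pvIndex_sub c k hk, hp⟩
  · rintro ⟨k, hk, hp⟩; exact ⟨k, pvIndex_complete c t k hk hp, hp⟩

-- the indexed scan finds exactly the keywords occurring as an infix of the text
theorem pvIndexScan_iff (cs : List Char) :
    pvIndexScan cs = true ↔ ∃ k ∈ pvKwChars, k <:+: cs := by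
  induction cs with
  | nil =>
    simp only [pvIndexScan]
    constructor
    · intro h; exact absurd h (by simp)
    · rintro ⟨k, hk, hi⟩
      rw [List.infix_nil] at hi
      subst hi
      rw [pvKwChars_eq] at hk
      exact absurd hk (by decide)
  | cons c t ih =>
    simp only [pvIndexScan, Bool.or_eq_true, ih, List.any_eq_true,
      PySem.Chars.startswith_iff]
    rw [show (∃ k ∈ pvKwIndex c, k <+: c :: t) ↔ _ from pvBucket_iff c t]
    constructor
    · rintro (⟨k, hk, hp⟩ | ⟨k, hk, hi⟩)
      · exact ⟨k, hk, hp.isInfix⟩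
      · exact ⟨k, hk, hi.trans (List.suffix_cons c t).isInfix⟩
    · rintro ⟨k, hk, hi⟩
      rcases List.infix_cons_iff.mp hi with hp | hi'
      · exact Or.inl ⟨k, hk, hp⟩
      · exact Or.inr ⟨k, hk, hi'⟩

-- ===== VERDICT (by name: the statement is the Claim_ definition above) =====
theorem is_image_request_spec : Claim_equal_is_image_request := by
  intro question _
  unfold Spec_is_image_request is_image_request is_image_request_alt
  rw [Bool.eq_iff_iff, pvIndexScan_iff]
  simp only [List.any_eq_true, PySem.Str.isIn_iff_infix, pvKwChars, List.mem_map]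
  constructor
  · rintro ⟨k, hk, hi⟩; exact ⟨k.toList, ⟨k, hk, rfl⟩, hi⟩
  · rintro ⟨_, ⟨k, hk, rfl⟩, hi⟩; exact ⟨k, hk, hi⟩
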